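-- pv_equiv track=rewrite | github.com/Enirsa/ContextFreeGrammarParser | inout.py | __split_by_vertical_bar
-- ===== SOURCE A (Python) =====
-- def __split_by_vertical_bar(string):
--     result = []
--
--     i = 0
--     while i < len(string):
--         prev_symbol = string[i - 1] if i > 0 else None
--
--         if string[i] == '|' and prev_symbol != '\\':
--             result.append(string[:i])
--             string = string[i + 1:]
--             i = 0
--         else:
--             i += 1
--     result.append(string)
--
--     return result
-- ===== SOURCE B (Python) =====
-- def __split_by_vertical_bar(string):
--     result = []
--     current = []
--     prev = None
--     for ch in string:
--         if ch == '|' and prev != '\\':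
--             result.append(''.join(current))
--             current = []
--         else:
--             current.append(ch)
--         prev = ch
--     result.append(''.join(current))
--     return result
-- ===== Notes on version B (the rewrite author's own statement) =====
-- stated objective: faster
-- what changed: Replaces A's restart-from-scratch loop (which re-slices and reassigns the whole remaining string after every bar) by a single fold over the characters that builds each segment in an accumulator, with no indexing or slicing at all.
import Mathlib
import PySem

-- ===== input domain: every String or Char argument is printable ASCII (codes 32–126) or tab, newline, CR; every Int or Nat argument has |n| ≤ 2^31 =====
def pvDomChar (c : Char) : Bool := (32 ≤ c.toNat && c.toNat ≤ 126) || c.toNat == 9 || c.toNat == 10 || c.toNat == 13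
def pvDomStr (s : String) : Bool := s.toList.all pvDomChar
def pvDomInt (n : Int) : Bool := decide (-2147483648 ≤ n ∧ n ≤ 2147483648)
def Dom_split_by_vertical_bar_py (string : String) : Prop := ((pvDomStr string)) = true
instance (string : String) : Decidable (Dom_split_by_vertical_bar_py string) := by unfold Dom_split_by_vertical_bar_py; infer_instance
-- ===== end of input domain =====

-- B replaces A's restart-after-each-split index-and-slice loop by a single character
-- fold that builds each segment as it goes; asymptotically faster on bar-heavy input.

-- ===== PORT A =====
-- A's while loop: i advances, or the string is cut after the bar and i resets to 0.
-- prev_symbol = string[i-1] if i > 0 else None is the inlined 'if 0 < i …' option;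
-- string[i] / string[i-1] with 0 ≤ index < len are exact as List.getD;
-- string[:i] = take i and string[i+1:] = drop (i+1) are exact for these in-range
-- nonnegative indices.
def aLoop (s : List Char) (i : Nat) (acc : List (List Char)) : List (List Char) :=
  if i < s.length then
    if s.getD i ' ' = '|' ∧
        (if 0 < i then some (s.getD (i - 1) ' ') else none) ≠ some '\\' then
      aLoop (s.drop (i + 1)) 0 (acc ++ [s.take i])
    else
      aLoop s (i + 1) acc
  else acc ++ [s]
termination_by s.length - i
decreasing_by
  · simp; omega
  · omega

def split_by_vertical_bar_py (string : String) : List String :=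
  (aLoop string.toList 0 []).map String.mk

-- ===== PORT B =====
-- B's for-each-character loop; the state is (result, current, prev) exactly as in
-- Source B, and ''.join of a list of chars is String.mk.
def bStep (st : List (List Char) × List Char × Option Char) (ch : Char) :
    List (List Char) × List Char × Option Char :=
  if ch = '|' ∧ st.2.2 ≠ some '\\' then (st.1 ++ [st.2.1], [], some ch)
  else (st.1, st.2.1 ++ [ch], some ch)

def split_by_vertical_bar_py_alt (string : String) : List String :=
  let st := string.toList.foldl bStep ([], [], none)
  (st.1 ++ [st.2.1]).map String.mk

-- ===== PRECONDITION & SPEC =====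
def Spec_split_by_vertical_bar_py (string : String) (out : List String) : Prop := out = split_by_vertical_bar_py_alt string
instance (string : String) (out : List String) : Decidable (Spec_split_by_vertical_bar_py string out) := by unfold Spec_split_by_vertical_bar_py; infer_instance

-- ===== CLAIM (what is proved, stated in full; the proofs are below) =====
def Claim_equal_split_by_vertical_bar_py : Prop := ∀ (string : String), Dom_split_by_vertical_bar_py string → Spec_split_by_vertical_bar_py string (split_by_vertical_bar_py string)

-- ===== LEMMAS AND PROOFS =====

-- Invariant: A's loop on (s, i, acc) — current segment s.take i, rest s.drop i —
-- equals B's fold over the remaining characters started from (acc, s.take i, p),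
-- where p is B's prev: the character before position i when i > 0, and otherwise
-- anything that is not a backslash (None at the very start, the bar just split on).
theorem aLoop_eq_fold (n : Nat) :
    ∀ (s : List Char) (i : Nat) (acc : List (List Char)) (p : Option Char),
      s.length - i ≤ n →
      (0 < i → p = some (s.getD (i - 1) ' ')) →
      (i = 0 → p ≠ some '\\') →
      aLoop s i acc =
        (let st := (s.drop i).foldl bStep (acc, s.take i, p); st.1 ++ [st.2.1]) := by
  induction n with
  | zero =>
    intro s i acc p hn _ _
    have h : ¬ i < s.length := by omega
    rw [aLoop, if_neg h, List.drop_eq_nil_of_le (by omega), List.take_of_length_le (by omega)]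
    simp [List.foldl]
  | succ n ih =>
    intro s i acc p hn hp hp0
    by_cases h : i < s.length
    · have hget : s.getD i ' ' = s[i] := List.getD_eq_getElem s ' ' h
      have hdrop : s.drop i = s[i] :: s.drop (i + 1) := (List.getElem_cons_drop h).symm
      rw [aLoop, if_pos h, hdrop]
      have hcond :
          (s.getD i ' ' = '|' ∧
            (if 0 < i then some (s.getD (i - 1) ' ') else none) ≠ some '\\')
          ↔ (s[i] = '|' ∧ p ≠ some '\\') := by
        rw [hget]
        rcases Nat.eq_zero_or_pos i with hi0 | hip
        · subst hi0
          rw [if_neg (lt_irrefl 0)]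
          constructor
          · rintro ⟨hb, -⟩; exact ⟨hb, hp0 rfl⟩
          · rintro ⟨hb, -⟩; exact ⟨hb, by simp⟩
        · rw [if_pos hip, hp hip]
      by_cases hc : s[i] = '|' ∧ p ≠ some '\\'
      · rw [if_pos (hcond.mpr hc)]
        simp only [List.foldl, bStep, if_pos hc]
        have hn' : (s.drop (i + 1)).length - 0 ≤ n := by simp; omega
        have := ih (s.drop (i + 1)) 0 (acc ++ [s.take i]) (some s[i]) hn'
          (by omega) (fun _ => by rw [hc.1]; decide)
        simpa using this
      · rw [if_neg (fun hh => hc (hcond.mp hh))]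
        simp only [List.foldl, bStep, if_neg hc]
        have htake : s.take i ++ [s[i]] = s.take (i + 1) := by
          rw [List.take_succ, List.getElem?_eq_getElem h]; rfl
        have := ih s (i + 1) acc (some s[i]) (by omega)
          (fun _ => by simp [List.getD, List.getElem?_eq_getElem h]) (by omega)
        rw [this, ← htake]
    · rw [aLoop, if_neg h, List.drop_eq_nil_of_le (by omega), List.take_of_length_le (by omega)]
      simp [List.foldl]

-- ===== VERDICT (by name: the statement is the Claim_ definition above) =====
theorem split_by_vertical_bar_py_spec : Claim_equal_split_by_vertical_bar_py := by
  intro string _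
  unfold Spec_split_by_vertical_bar_py split_by_vertical_bar_py split_by_vertical_bar_py_alt
  have h := aLoop_eq_fold string.toList.length string.toList 0 [] none (by omega)
    (by omega) (fun _ => by decide)
  simp only [List.drop_zero, List.take_zero] at h
  rw [h]
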